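-- pv_equiv track=rewrite | github.com/Omkarchikkodi/smarthire-plus | ml/fix_titles_local.py | infer_from_skills
-- ===== SOURCE A (Python) =====
-- SKILL_TO_ROLE = {
--     "python": "Python Developer",
--     "java": "Java Developer",
--     "c++": "C++ Developer",
--     "javascript": "JavaScript Developer",
--     "react": "React Developer",
--     "node": "Node.js Developer",
--     "sql": "SQL Developer",
--     "dba": "Database Administrator",
--     "data": "Data Analyst",
--     "ml": "Machine Learning Engineer",
--     "machine learning": "Machine Learning Engineer",
--     "deep learning": "Deep Learning Engineer",
--     "nlp": "NLP Engineer",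
--     "cloud": "Cloud Engineer",
--     "aws": "AWS Cloud Engineer",
--     "devops": "DevOps Engineer",
--     "embedded": "Embedded Engineer",
--     "software": "Software Engineer",
--     "full stack": "Full Stack Developer",
--     "frontend": "Frontend Developer",
--     "backend": "Backend Developer",
-- }
--
-- def infer_from_skills(skills):
--     if not skills:
--         return None
--
--     skills_lower = [s.lower() for s in skills]
--
--     # Highest priority matching
--     for key, role in SKILL_TO_ROLE.items():
--         if any(key in s for s in skills_lower):
--             return role
--
--     return None
-- ===== SOURCE B (Python) =====
-- SKILL_TO_ROLE = {
--     "python": "Python Developer",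
--     "java": "Java Developer",
--     "c++": "C++ Developer",
--     "javascript": "JavaScript Developer",
--     "react": "React Developer",
--     "node": "Node.js Developer",
--     "sql": "SQL Developer",
--     "dba": "Database Administrator",
--     "data": "Data Analyst",
--     "ml": "Machine Learning Engineer",
--     "machine learning": "Machine Learning Engineer",
--     "deep learning": "Deep Learning Engineer",
--     "nlp": "NLP Engineer",
--     "cloud": "Cloud Engineer",
--     "aws": "AWS Cloud Engineer",
--     "devops": "DevOps Engineer",
--     "embedded": "Embedded Engineer",
--     "software": "Software Engineer",
--     "full stack": "Full Stack Developer",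
--     "frontend": "Frontend Developer",
--     "backend": "Backend Developer",
-- }
--
-- def infer_from_skills(skills):
--     if not skills:
--         return None
--     keys = list(SKILL_TO_ROLE)
--     best = None
--     for s in skills:
--         sl = s.lower()
--         for i, k in enumerate(keys):
--             if k in sl and (best is None or i < best):
--                 best = i
--     if best is None:
--         return None
--     return SKILL_TO_ROLE[keys[best]]
-- ===== Notes on version B (the rewrite author's own statement) =====
-- stated objective: alternative
-- what changed: Instead of scanning roles in priority order and returning on the first role matched by any skill, B makes one pass over the skills, tracking the minimum priority index among all substring matches, and looks the winning role up at the end.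
import Mathlib
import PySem

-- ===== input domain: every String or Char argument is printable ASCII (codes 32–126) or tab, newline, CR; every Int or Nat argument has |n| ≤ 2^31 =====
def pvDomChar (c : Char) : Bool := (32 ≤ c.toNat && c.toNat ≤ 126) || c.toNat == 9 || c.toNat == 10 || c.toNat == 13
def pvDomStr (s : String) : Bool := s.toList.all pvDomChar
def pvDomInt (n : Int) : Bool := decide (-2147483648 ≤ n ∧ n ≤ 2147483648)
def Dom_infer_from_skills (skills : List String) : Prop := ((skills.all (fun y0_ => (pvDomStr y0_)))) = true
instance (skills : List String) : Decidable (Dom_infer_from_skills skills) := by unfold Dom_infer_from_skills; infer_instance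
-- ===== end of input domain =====

-- B replaces A's priority-ordered scan over roles (return on first role matched by any skill) by a
-- single collecting pass over the skills that tracks the minimum priority index among all substring
-- matches and looks the winning role up at the end; objective: alternative decomposition, same cost.

-- ===== PORT A =====
def TABLE : List (String × String) := [
  ("python", "Python Developer"),
  ("java", "Java Developer"),
  ("c++", "C++ Developer"),
  ("javascript", "JavaScript Developer"),
  ("react", "React Developer"),
  ("node", "Node.js Developer"),
  ("sql", "SQL Developer"),
  ("dba", "Database Administrator"),
  ("data", "Data Analyst"),
  ("ml", "Machine Learning Engineer"),
  ("machine learning", "Machine Learning Engineer"),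
  ("deep learning", "Deep Learning Engineer"),
  ("nlp", "NLP Engineer"),
  ("cloud", "Cloud Engineer"),
  ("aws", "AWS Cloud Engineer"),
  ("devops", "DevOps Engineer"),
  ("embedded", "Embedded Engineer"),
  ("software", "Software Engineer"),
  ("full stack", "Full Stack Developer"),
  ("frontend", "Frontend Developer"),
  ("backend", "Backend Developer")]

-- the 'for key, role in SKILL_TO_ROLE.items(): if any(key in s for s in skills_lower): return role' loop
def goA : List (String × String) → List String → Option String
  | [], _ => none
  | (k, r) :: ps, sl => if sl.any (fun s => PySem.Str.isIn k s) then some r else goA ps sl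

def infer_from_skills (skills : List String) : Option String :=
  if skills.isEmpty then none
  else goA TABLE (skills.map PySem.Str.lower)

-- ===== PORT B =====
-- the body of B's inner 'for i, k in enumerate(keys)' loop
def innerB (sl : String) (b : Option Int) (ik : Int × String) : Option Int :=
  if PySem.Str.isIn ik.2 sl then
    match b with
    | none => some ik.1
    | some j => if ik.1 < j then some ik.1 else some j
  else b

def infer_from_skills_alt (skills : List String) : Option String :=
  if skills.isEmpty then none
  else
    let keys := TABLE.map Prod.fst
    match skills.foldl
        (fun b s => (PySem.List.enumerate keys 0).foldl (innerB (PySem.Str.lower s)) b) none with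
    | none => none
    | some i => (PySem.Dict.mk TABLE).get? ((PySem.List.pyGet? keys i).getD "")

-- ===== PRECONDITION & SPEC =====
def Spec_infer_from_skills (skills : List String) (out : Option String) : Prop := out = infer_from_skills_alt skills
instance (skills : List String) (out : Option String) : Decidable (Spec_infer_from_skills skills out) := by unfold Spec_infer_from_skills; infer_instance

-- ===== CLAIM (what is proved, stated in full; the proofs are below) =====
def Claim_equal_infer_from_skills : Prop := ∀ (skills : List String), Dom_infer_from_skills skills → Spec_infer_from_skills skills (infer_from_skills skills)

-- ===== LEMMAS AND PROOFS =====

-- minimum of two optional indices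
def omin : Option Int → Option Int → Option Int
  | none, b => b
  | some a, none => some a
  | some a, some b => some (min a b)

-- optional match index of one (index, key) pair against one lowered skill
def mOpt (sl : String) (ik : Int × String) : Option Int :=
  if PySem.Str.isIn ik.2 sl then some ik.1 else none

theorem omin_none_right (a : Option Int) : omin a none = a := by cases a <;> rfl

theorem omin_assoc (a b c : Option Int) : omin (omin a b) c = omin a (omin b c) := by
  cases a <;> cases b <;> cases c <;> simp [omin, min_assoc]

theorem omin_ac (a b c d : Option Int) :
    omin (omin a b) (omin c d) = omin (omin a c) (omin b d) := by
  cases a <;> cases b <;> cases c <;> cases d <;> simp [omin] <;> omega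

theorem innerB_eq (sl : String) : innerB sl = fun b ik => omin b (mOpt sl ik) := by
  funext b ik
  simp only [innerB, mOpt]
  cases b with
  | none => split <;> rfl
  | some j => split <;> simp [omin] <;> split <;> simp <;> omega

theorem foldl_omin_shift {α : Type} (h : α → Option Int) (L : List α) (b : Option Int) :
    L.foldl (fun b x => omin b (h x)) b = omin b (L.foldl (fun b x => omin b (h x)) none) := by
  induction L generalizing b with
  | nil => simp [omin_none_right]
  | cons x L ih =>
    simp only [List.foldl_cons]
    rw [ih (omin b (h x)), ih (omin none (h x)), omin_assoc]
    rfl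

theorem foldl_omin_interchange {α : Type} (f g : α → Option Int) (L : List α) :
    L.foldl (fun b x => omin b (omin (f x) (g x))) none
      = omin (L.foldl (fun b x => omin b (f x)) none) (L.foldl (fun b x => omin b (g x)) none) := by
  induction L with
  | nil => rfl
  | cons x L ih =>
    simp only [List.foldl_cons]
    rw [foldl_omin_shift (fun x => omin (f x) (g x)), foldl_omin_shift f, foldl_omin_shift g]
    show omin (omin (f x) (g x)) _ = omin (omin (f x) _) (omin (g x) _)
    rw [ih, omin_ac]

theorem foldl_omin_ite {α : Type} (c : α → Bool) (i : Int) (L : List α) :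
    L.foldl (fun b x => omin b (if c x then some i else none)) none
      = if L.any c then some i else none := by
  induction L with
  | nil => rfl
  | cons x L ih =>
    simp only [List.foldl_cons, List.any_cons]
    rw [foldl_omin_shift (fun x => if c x then some i else none), ih]
    by_cases hx : c x = true <;> by_cases hL : L.any c = true <;>
      simp [hx, hL, omin, min_self]

-- the whole double fold equals the first (= minimal-index) any-skill match
theorem best_char (skills : List String) (E : List (Int × String))
    (hE : E.Pairwise (fun p q => p.1 < q.1)) :
    skills.foldl (fun b s => E.foldl (innerB (PySem.Str.lower s)) b) none
      = (E.find? (fun ik => skills.any (fun s => PySem.Str.isIn ik.2 (PySem.Str.lower s)))).map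
          Prod.fst := by
  have hstep : (fun (b : Option Int) (s : String) => E.foldl (innerB (PySem.Str.lower s)) b)
      = fun b s => omin b (E.foldl (fun b ik => omin b (mOpt (PySem.Str.lower s) ik)) none) := by
    funext b s
    rw [innerB_eq, foldl_omin_shift (α := Int × String) (mOpt (PySem.Str.lower s)) E b]
  rw [hstep]
  clear hstep
  induction E with
  | nil =>
    simp only [List.foldl_nil, List.find?_nil]
    induction skills with
    | nil => rfl
    | cons s L ih => simpa [omin_none_right] using ih
  | cons ik rest ih =>
    rcases List.pairwise_cons.mp hE with ⟨hhead, hrest⟩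
    have hsplit : (fun (b : Option Int) (s : String) =>
        omin b ((ik :: rest).foldl (fun b ik => omin b (mOpt (PySem.Str.lower s) ik)) none))
        = fun b s => omin b (omin (mOpt (PySem.Str.lower s) ik)
            (rest.foldl (fun b ik => omin b (mOpt (PySem.Str.lower s) ik)) none)) := by
      funext b s
      simp only [List.foldl_cons]
      rw [foldl_omin_shift (mOpt (PySem.Str.lower s)) rest (omin none (mOpt (PySem.Str.lower s) ik))]
      rfl
    rw [hsplit, foldl_omin_interchange (fun s => mOpt (PySem.Str.lower s) ik)
        (fun s => rest.foldl (fun b ik => omin b (mOpt (PySem.Str.lower s) ik)) none) skills,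
      ih hrest]
    have hite := foldl_omin_ite (fun s => PySem.Str.isIn ik.2 (PySem.Str.lower s)) ik.1 skills
    simp only [mOpt]
    rw [hite]
    by_cases hany : skills.any (fun s => PySem.Str.isIn ik.2 (PySem.Str.lower s)) = true
    · rw [List.find?_cons_of_pos
        (p := fun (q : Int × String) => skills.any (fun s => PySem.Str.isIn q.2 (PySem.Str.lower s)))
        (by exact hany), Option.map_some, if_pos hany]
      cases hq : rest.find? (fun p => skills.any fun s => PySem.Str.isIn p.2 (PySem.Str.lower s)) with
      | none => simp [omin]
      | some q =>
        have hlt := hhead q (List.mem_of_find?_eq_some hq)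
        simp [omin, min_eq_left (le_of_lt hlt)]
    · rw [List.find?_cons_of_neg
        (p := fun (q : Int × String) => skills.any (fun s => PySem.Str.isIn q.2 (PySem.Str.lower s)))
        (by exact hany), if_neg hany]
      rfl

-- A's loop as a find?
theorem goA_find? (ps : List (String × String)) (sl : List String) :
    goA ps sl = (ps.find? (fun p => sl.any (fun s => PySem.Str.isIn p.1 s))).map Prod.snd := by
  induction ps with
  | nil => rfl
  | cons p ps ih =>
    obtain ⟨k, r⟩ := p
    unfold goA
    by_cases h : sl.any (fun s => PySem.Str.isIn k s) = true
    · rw [if_pos h, List.find?_cons_of_pos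
        (p := fun (q : String × String) => sl.any (fun s => PySem.Str.isIn q.1 s)) (by exact h),
        Option.map_some]
    · rw [if_neg h, ih, List.find?_cons_of_neg
        (p := fun (q : String × String) => sl.any (fun s => PySem.Str.isIn q.1 s)) (by exact h)]

-- literal glue on the fixed table: index-then-lookup equals find?-then-snd
set_option maxHeartbeats 1000000 in
theorem table_glue (c : String → Bool) :
    (match ((PySem.List.enumerate (TABLE.map Prod.fst) 0).find? (fun ik => c ik.2)).map Prod.fst with
      | none => (none : Option String)
      | some i => (PySem.Dict.mk TABLE).get? ((PySem.List.pyGet? (TABLE.map Prod.fst) i).getD ""))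
    = (TABLE.find? (fun p => c p.1)).map Prod.snd := by
  simp only [TABLE, List.map_cons, List.map_nil, PySem.List.enumerate_cons,
    PySem.List.enumerate_nil, List.find?_cons, List.find?_nil]
  cases h0 : c "python"
  case true => rfl
  cases h1 : c "java"
  case true => rfl
  cases h2 : c "c++"
  case true => rfl
  cases h3 : c "javascript"
  case true => rfl
  cases h4 : c "react"
  case true => rfl
  cases h5 : c "node"
  case true => rfl
  cases h6 : c "sql"
  case true => rfl
  cases h7 : c "dba"
  case true => rfl
  cases h8 : c "data"
  case true => rfl
  cases h9 : c "ml"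
  case true => rfl
  cases h10 : c "machine learning"
  case true => rfl
  cases h11 : c "deep learning"
  case true => rfl
  cases h12 : c "nlp"
  case true => rfl
  cases h13 : c "cloud"
  case true => rfl
  cases h14 : c "aws"
  case true => rfl
  cases h15 : c "devops"
  case true => rfl
  cases h16 : c "embedded"
  case true => rfl
  cases h17 : c "software"
  case true => rfl
  cases h18 : c "full stack"
  case true => rfl
  cases h19 : c "frontend"
  case true => rfl
  cases h20 : c "backend"
  case true => rfl
  rfl

set_option maxHeartbeats 1000000 in
theorem infer_from_skills_spec : Claim_equal_infer_from_skills := by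
  intro skills _
  show infer_from_skills skills = infer_from_skills_alt skills
  by_cases hempty : skills.isEmpty
  · simp [infer_from_skills, infer_from_skills_alt, hempty]
  · have hpred : (fun (p : String × String) =>
        (skills.map PySem.Str.lower).any (fun s => PySem.Str.isIn p.1 s))
        = fun p => skills.any (fun s => PySem.Str.isIn p.1 (PySem.Str.lower s)) := by
      funext p; rw [List.any_map]; rfl
    unfold infer_from_skills infer_from_skills_alt
    rw [if_neg hempty, if_neg hempty]
    show goA TABLE (skills.map PySem.Str.lower)
      = match skills.foldl (fun b s =>
            (PySem.List.enumerate (TABLE.map Prod.fst) 0).foldl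
              (innerB (PySem.Str.lower s)) b) none with
        | none => none
        | some i => (PySem.Dict.mk TABLE).get? ((PySem.List.pyGet? (TABLE.map Prod.fst) i).getD "")
    rw [goA_find?, hpred,
      best_char skills _ (PySem.List.pairwise_lt_enumerate (TABLE.map Prod.fst) 0)]
    exact (table_glue (fun k => skills.any (fun s => PySem.Str.isIn k (PySem.Str.lower s)))).symm
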